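-- pv_equiv track=rewrite | github.com/PetrPrazak/AdventOfCode | 2016/07/aoc2016_07.py | check_parts2
-- ===== SOURCE A (Python) =====
-- def abas(word):
--     for p in range(len(word) - 2):
--         a = word[p:p + 3]
--         if a[0] == a[2] and a[0] != a[1]:
--             yield a
--
-- def check_parts2(supernets, hypernets, line):
--     for part in supernets:
--         for aba in abas(part):
--             bab = aba[1] + aba[0] + aba[1]
--             for h in hypernets:
--                 if h.find(bab) != -1:
--                     return True
--     return False
-- ===== SOURCE B (Python) =====
-- def _bab_at(part, i):
--     a, b, c = part[i], part[i + 1], part[i + 2]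
--     if a == c and a != b:
--         return b + a + b
--     return None
--
-- def check_parts2(supernets, hypernets, line):
--     # Phase 1: collect every target BAB from the supernets.
--     babs = set()
--     for part in supernets:
--         for i in range(len(part) - 2):
--             bab = _bab_at(part, i)
--             if bab is not None:
--                 babs.add(bab)
--     # Phase 2: collect every 3-char window of the hypernets.
--     windows = set()
--     for h in hypernets:
--         for i in range(len(h) - 2):
--             windows.add(h[i:i + 3])
--     # A match exists iff the two sets intersect.
--     return bool(babs & windows)
-- ===== Notes on version B (the rewrite author's own statement) =====
-- stated objective: alternative
-- what changed: Replaces the nested supernet->aba->hypernet scan with early return by two independent populate phases (a set of all BAB targets from the supernets, a set of all 3-char windows of the hypernets) followed by one set intersection.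
import Mathlib
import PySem

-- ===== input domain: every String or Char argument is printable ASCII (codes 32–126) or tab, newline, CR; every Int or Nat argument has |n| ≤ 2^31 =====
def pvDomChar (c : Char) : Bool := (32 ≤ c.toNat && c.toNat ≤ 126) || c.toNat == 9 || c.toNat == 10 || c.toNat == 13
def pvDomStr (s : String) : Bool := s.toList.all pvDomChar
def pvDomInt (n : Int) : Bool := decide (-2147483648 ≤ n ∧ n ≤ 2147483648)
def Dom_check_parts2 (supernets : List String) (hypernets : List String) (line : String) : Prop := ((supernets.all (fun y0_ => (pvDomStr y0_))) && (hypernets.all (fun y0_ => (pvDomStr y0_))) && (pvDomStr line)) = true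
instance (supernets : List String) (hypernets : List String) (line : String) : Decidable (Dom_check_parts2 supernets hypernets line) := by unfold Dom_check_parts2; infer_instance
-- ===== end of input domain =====

-- B replaces A's nested scan-with-early-return by two independent populate phases (a BAB set from
-- the supernets, a 3-char-window set from the hypernets) followed by one set intersection.

-- ===== PORT A =====
def abas (word : String) : List String :=
  (PySem.List.pyRange 0 (PySem.Str.len word - 2) 1).filterMap (fun p =>
    let a := PySem.Str.slice word (some p) (some (p + 3))
    match PySem.Str.pyGet? a 0, PySem.Str.pyGet? a 1, PySem.Str.pyGet? a 2 with
    | some c0, some c1, some c2 => if c0 == c2 && !(c0 == c1) then some a else none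
    | _, _, _ => none)

def check_parts2 (supernets : List String) (hypernets : List String) (line : String) : Bool :=
  supernets.any (fun part =>
    (abas part).any (fun aba =>
      match PySem.Str.pyGet? aba 1, PySem.Str.pyGet? aba 0 with
      | some b, some a =>
        let bab := String.ofList [b, a, b]
        hypernets.any (fun h => PySem.Str.find h bab != -1)
      | _, _ => false))

-- ===== PORT B =====
def babAt (part : String) (i : Int) : Option String :=
  match PySem.Str.pyGet? part i, PySem.Str.pyGet? part (i + 1), PySem.Str.pyGet? part (i + 2) with
  | some a, some b, some c =>
    if a == c && !(a == b) then some (String.ofList [b, a, b]) else none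
  | _, _, _ => none

def check_parts2_alt (supernets : List String) (hypernets : List String) (line : String) : Bool :=
  let babs : PySem.Set String := supernets.foldl (fun s part =>
    (PySem.List.pyRange 0 (PySem.Str.len part - 2) 1).foldl (fun s i =>
      match babAt part i with
      | some bab => PySem.Set.add s bab
      | none => s) s) PySem.Set.empty
  let windows : PySem.Set String := hypernets.foldl (fun s h =>
    (PySem.List.pyRange 0 (PySem.Str.len h - 2) 1).foldl (fun s i =>
      PySem.Set.add s (PySem.Str.slice h (some i) (some (i + 3)))) s) PySem.Set.empty
  !(PySem.Set.inter babs windows).isEmpty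

-- ===== PRECONDITION & SPEC =====
def Spec_check_parts2 (supernets : List String) (hypernets : List String) (line : String) (out : Bool) : Prop := out = check_parts2_alt supernets hypernets line
instance (supernets : List String) (hypernets : List String) (line : String) (out : Bool) : Decidable (Spec_check_parts2 supernets hypernets line out) := by unfold Spec_check_parts2; infer_instance

-- ===== CLAIM (what is proved, stated in full; the proofs are below) =====
def Claim_equal_check_parts2 : Prop := ∀ (supernets : List String) (hypernets : List String) (line : String), Dom_check_parts2 supernets hypernets line → Spec_check_parts2 supernets hypernets line (check_parts2 supernets hypernets line)

-- ===== LEMMAS AND PROOFS =====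

-- the common semantic characterisation: some supernet window c0 c1 c2 with c0 = c2 ≠ c1
-- whose BAB [c1,c0,c1] is an infix of some hypernet
def matchProp (S H : List String) : Prop :=
  ∃ part ∈ S, ∃ k : Nat, k + 3 ≤ part.toList.length ∧
    part.toList.getD k ' ' = part.toList.getD (k + 2) ' ' ∧
    part.toList.getD k ' ' ≠ part.toList.getD (k + 1) ' ' ∧
    ∃ h ∈ H, [part.toList.getD (k + 1) ' ', part.toList.getD k ' ', part.toList.getD (k + 1) ' '] <:+: h.toList

lemma take3_drop (l : List Char) (k : Nat) (h : k + 3 ≤ l.length) :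
    (l.drop k).take 3 = [l.getD k ' ', l.getD (k + 1) ' ', l.getD (k + 2) ' '] := by
  have h0 : k < l.length := by omega
  have h1 : k + 1 < l.length := by omega
  have h2 : k + 2 < l.length := by omega
  rw [List.drop_eq_getElem_cons h0, List.drop_eq_getElem_cons h1, List.drop_eq_getElem_cons h2,
    List.take_succ_cons, List.take_succ_cons, List.take_succ_cons, List.take_zero]
  simp [List.getD, h0, h1, h2]

lemma infix_iff_window (w l : List Char) (hw : w.length = 3) :
    w <:+: l ↔ ∃ k : Nat, k + 3 ≤ l.length ∧ (l.drop k).take 3 = w := by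
  constructor
  · rintro ⟨s, t, rfl⟩
    refine ⟨s.length, ?_, ?_⟩
    · simp [hw]
      try omega
    · rw [List.append_assoc, List.drop_left, ← hw, List.take_left]
  · rintro ⟨k, hk, rfl⟩
    exact ((l.drop k).take_prefix 3).isInfix.trans (l.drop_suffix k).isInfix

-- the ABA/BAB condition at an admitted Int index, rephrased on Nat indices
lemma babAt_iff (part : String) (y : String) :
    (∃ i ∈ PySem.List.pyRange 0 (PySem.Str.len part - 2) 1, babAt part i = some y) ↔
    ∃ k : Nat, k + 3 ≤ part.toList.length ∧
      part.toList.getD k ' ' = part.toList.getD (k + 2) ' ' ∧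
      part.toList.getD k ' ' ≠ part.toList.getD (k + 1) ' ' ∧
      y = String.ofList [part.toList.getD (k + 1) ' ', part.toList.getD k ' ', part.toList.getD (k + 1) ' '] := by
  constructor
  · rintro ⟨i, hi, hb⟩
    rw [PySem.List.mem_pyRange_one, PySem.Str.len_eq] at hi
    obtain ⟨hi0, hi2⟩ := hi
    set k := i.toNat with hk
    have hik : i = (k : Int) := by omega
    have hklen : k + 3 ≤ part.toList.length := by omega
    have e0 : PySem.Str.pyGet? part i = some (part.toList.getD k ' ') := by
      rw [hik, PySem.Str.pyGet?_natCast, List.getElem?_eq_getElem (by omega), List.getD_eq_getElem _ _ (by omega)]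
    have e1 : PySem.Str.pyGet? part (i + 1) = some (part.toList.getD (k + 1) ' ') := by
      rw [hik, show ((k : Int) + 1) = ((k + 1 : Nat) : Int) by push_cast; ring,
        PySem.Str.pyGet?_natCast, List.getElem?_eq_getElem (by omega), List.getD_eq_getElem _ _ (by omega)]
    have e2 : PySem.Str.pyGet? part (i + 2) = some (part.toList.getD (k + 2) ' ') := by
      rw [hik, show ((k : Int) + 2) = ((k + 2 : Nat) : Int) by push_cast; ring,
        PySem.Str.pyGet?_natCast, List.getElem?_eq_getElem (by omega), List.getD_eq_getElem _ _ (by omega)]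
    rw [babAt, e0, e1, e2] at hb
    simp at hb
    exact ⟨k, hklen, hb.1.1, hb.1.2, hb.2.symm⟩
  · rintro ⟨k, hklen, hc02, hc01, rfl⟩
    refine ⟨(k : Int), ?_, ?_⟩
    · rw [PySem.List.mem_pyRange_one, PySem.Str.len_eq]
      omega
    · have e0 : PySem.Str.pyGet? part (k : Int) = some (part.toList.getD k ' ') := by
        rw [PySem.Str.pyGet?_natCast, List.getElem?_eq_getElem (by omega), List.getD_eq_getElem _ _ (by omega)]
      have e1 : PySem.Str.pyGet? part ((k : Int) + 1) = some (part.toList.getD (k + 1) ' ') := by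
        rw [show ((k : Int) + 1) = ((k + 1 : Nat) : Int) by push_cast; ring,
          PySem.Str.pyGet?_natCast, List.getElem?_eq_getElem (by omega), List.getD_eq_getElem _ _ (by omega)]
      have e2 : PySem.Str.pyGet? part ((k : Int) + 2) = some (part.toList.getD (k + 2) ' ') := by
        rw [show ((k : Int) + 2) = ((k + 2 : Nat) : Int) by push_cast; ring,
          PySem.Str.pyGet?_natCast, List.getElem?_eq_getElem (by omega), List.getD_eq_getElem _ _ (by omega)]
      rw [babAt, e0, e1, e2]
      simp
      exact ⟨hc02, hc01⟩

-- A's slice window at an admitted index, with its three characters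
lemma slice_toList (h : String) (k : Nat) (hk : k + 3 ≤ h.toList.length) :
    (PySem.Str.slice h (some (k : Int)) (some ((k : Int) + 3))).toList =
      [h.toList.getD k ' ', h.toList.getD (k + 1) ' ', h.toList.getD (k + 2) ' '] := by
  rw [PySem.Str.toList_slice, PySem.Chars.slice_eq_listSlice,
    show ((k : Int) + 3) = ((k : Int) + ((3 : Nat) : Int)) by norm_num,
    PySem.List.slice_natCast_add, take3_drop _ _ hk]

lemma A_iff (S H : List String) (line : String) :
    check_parts2 S H line = true ↔ matchProp S H := by
  rw [check_parts2, List.any_eq_true]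
  unfold matchProp
  constructor
  · rintro ⟨part, hpart, hany⟩
    rw [List.any_eq_true] at hany
    obtain ⟨aba, haba, hmatch⟩ := hany
    rw [abas, List.mem_filterMap] at haba
    obtain ⟨i, hi, hf⟩ := haba
    rw [PySem.List.mem_pyRange_one, PySem.Str.len_eq] at hi
    set k := i.toNat with hk
    have hik : i = (k : Int) := by omega
    have hklen : k + 3 ≤ part.toList.length := by omega
    have hsl := slice_toList part k hklen
    rw [hik] at hf
    simp only at hf
    set a := PySem.Str.slice part (some (k : Int)) (some ((k : Int) + 3)) with ha
    have g0 : PySem.Str.pyGet? a 0 = some (part.toList.getD k ' ') := by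
      rw [show (0 : Int) = ((0 : Nat) : Int) by norm_num, PySem.Str.pyGet?_natCast, hsl]; rfl
    have g1 : PySem.Str.pyGet? a 1 = some (part.toList.getD (k + 1) ' ') := by
      rw [show (1 : Int) = ((1 : Nat) : Int) by norm_num, PySem.Str.pyGet?_natCast, hsl]; rfl
    have g2 : PySem.Str.pyGet? a 2 = some (part.toList.getD (k + 2) ' ') := by
      rw [show (2 : Int) = ((2 : Nat) : Int) by norm_num, PySem.Str.pyGet?_natCast, hsl]; rfl
    rw [g0, g1, g2] at hf
    simp at hf
    obtain ⟨⟨hcnd1, hcnd2⟩, rfl⟩ := hf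
    rw [g1, g0] at hmatch
    simp only [List.any_eq_true] at hmatch
    obtain ⟨hnet, hh, hfind⟩ := hmatch
    refine ⟨part, hpart, k, hklen, hcnd1, hcnd2, hnet, hh, ?_⟩
    have hne : PySem.Str.find hnet (String.ofList
        [part.toList.getD (k + 1) ' ', part.toList.getD k ' ', part.toList.getD (k + 1) ' ']) ≠ -1 := by
      simpa using hfind
    have := (PySem.Str.find_ne_neg_one_iff hnet _).mp hne
    simpa using this
  · rintro ⟨part, hpart, k, hklen, hc02, hc01, hnet, hh, hinf⟩
    refine ⟨part, hpart, ?_⟩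
    rw [List.any_eq_true]
    have hsl := slice_toList part k hklen
    set a := PySem.Str.slice part (some (k : Int)) (some ((k : Int) + 3)) with ha
    have g0 : PySem.Str.pyGet? a 0 = some (part.toList.getD k ' ') := by
      rw [show (0 : Int) = ((0 : Nat) : Int) by norm_num, PySem.Str.pyGet?_natCast, hsl]; rfl
    have g1 : PySem.Str.pyGet? a 1 = some (part.toList.getD (k + 1) ' ') := by
      rw [show (1 : Int) = ((1 : Nat) : Int) by norm_num, PySem.Str.pyGet?_natCast, hsl]; rfl
    have g2 : PySem.Str.pyGet? a 2 = some (part.toList.getD (k + 2) ' ') := by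
      rw [show (2 : Int) = ((2 : Nat) : Int) by norm_num, PySem.Str.pyGet?_natCast, hsl]; rfl
    refine ⟨a, ?_, ?_⟩
    · rw [abas, List.mem_filterMap]
      refine ⟨(k : Int), ?_, ?_⟩
      · rw [PySem.List.mem_pyRange_one, PySem.Str.len_eq]; omega
      · simp only
        rw [← ha, g0, g1, g2]
        simp
        exact ⟨hc02, hc01⟩
    · rw [g1, g0]
      simp only [List.any_eq_true]
      refine ⟨hnet, hh, ?_⟩
      simp only [bne_iff_ne, ne_eq]
      rw [← ne_eq, PySem.Str.find_ne_neg_one_iff]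
      simpa using hinf

-- membership in a fold that conditionally adds g-values to a PySem.Set
lemma mem_foldl_addOpt {β : Type} (g : β → Option String) (l : List β) (s : List String) (y : String) :
    y ∈ l.foldl (fun s i => match g i with | some x => PySem.Set.add s x | none => s) s ↔
      y ∈ s ∨ ∃ i ∈ l, g i = some y := by
  induction l generalizing s with
  | nil => simp
  | cons a l ih =>
    rw [List.foldl_cons, ih]
    cases hg : g a with
    | none =>
      simp only [hg, List.mem_cons]
      constructor
      · rintro (hy | ⟨i, hi, hgi⟩)
        · exact Or.inl hy
        · exact Or.inr ⟨i, Or.inr hi, hgi⟩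
      · rintro (hy | ⟨i, (rfl | hi), hgi⟩)
        · exact Or.inl hy
        · rw [hg] at hgi; simp at hgi
        · exact Or.inr ⟨i, hi, hgi⟩
    | some x =>
      simp only [hg, PySem.Set.mem_add, List.mem_cons]
      constructor
      · rintro (⟨hy | rfl⟩ | ⟨i, hi, hgi⟩)
        · tauto
        · exact Or.inr ⟨a, Or.inl rfl, hg⟩
        · exact Or.inr ⟨i, Or.inr hi, hgi⟩
      · rintro (hy | ⟨i, (rfl | hi), hgi⟩)
        · tauto
        · rw [hg] at hgi; exact Or.inl (Or.inr (Option.some_inj.mp hgi).symm)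
        · exact Or.inr ⟨i, hi, hgi⟩

lemma mem_foldl_add {β : Type} (g : β → String) (l : List β) (s : List String) (y : String) :
    y ∈ l.foldl (fun s i => PySem.Set.add s (g i)) s ↔ y ∈ s ∨ ∃ i ∈ l, y = g i := by
  rw [← PySem.Set.update_map_eq_foldl_add, PySem.Set.mem_update]
  simp [eq_comm]

lemma mem_babs (S : List String) (s0 : List String) (y : String) :
    y ∈ S.foldl (fun s part =>
        (PySem.List.pyRange 0 (PySem.Str.len part - 2) 1).foldl (fun s i =>
          match babAt part i with
          | some bab => PySem.Set.add s bab
          | none => s) s) s0 ↔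
      y ∈ s0 ∨ ∃ part ∈ S, ∃ i ∈ PySem.List.pyRange 0 (PySem.Str.len part - 2) 1, babAt part i = some y := by
  induction S generalizing s0 with
  | nil => simp
  | cons p S ih =>
    rw [List.foldl_cons, ih, mem_foldl_addOpt]
    simp only [List.mem_cons]
    constructor
    · rintro ((hy | ⟨i, hi, hgi⟩) | ⟨part, hp, hrest⟩)
      · tauto
      · exact Or.inr ⟨p, Or.inl rfl, i, hi, hgi⟩
      · exact Or.inr ⟨part, Or.inr hp, hrest⟩
    · rintro (hy | ⟨part, (rfl | hp), hrest⟩)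
      · tauto
      · exact Or.inl (Or.inr hrest)
      · exact Or.inr ⟨part, hp, hrest⟩

lemma mem_windows (H : List String) (s0 : List String) (y : String) :
    y ∈ H.foldl (fun s h =>
        (PySem.List.pyRange 0 (PySem.Str.len h - 2) 1).foldl (fun s i =>
          PySem.Set.add s (PySem.Str.slice h (some i) (some (i + 3)))) s) s0 ↔
      y ∈ s0 ∨ ∃ h ∈ H, ∃ i ∈ PySem.List.pyRange 0 (PySem.Str.len h - 2) 1,
        y = PySem.Str.slice h (some i) (some (i + 3)) := by
  induction H generalizing s0 with
  | nil => simp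
  | cons p H ih =>
    rw [List.foldl_cons, ih, mem_foldl_add]
    simp only [List.mem_cons]
    constructor
    · rintro ((hy | ⟨i, hi, hgi⟩) | ⟨h, hp, hrest⟩)
      · tauto
      · exact Or.inr ⟨p, Or.inl rfl, i, hi, hgi⟩
      · exact Or.inr ⟨h, Or.inr hp, hrest⟩
    · rintro (hy | ⟨h, (rfl | hp), hrest⟩)
      · tauto
      · exact Or.inl (Or.inr hrest)
      · exact Or.inr ⟨h, hp, hrest⟩

lemma window_iff (hnet y : String) :
    (∃ i ∈ PySem.List.pyRange 0 (PySem.Str.len hnet - 2) 1,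
        y = PySem.Str.slice hnet (some i) (some (i + 3))) ↔
      ∃ k : Nat, k + 3 ≤ hnet.toList.length ∧ (hnet.toList.drop k).take 3 = y.toList := by
  constructor
  · rintro ⟨i, hi, rfl⟩
    rw [PySem.List.mem_pyRange_one, PySem.Str.len_eq] at hi
    set k := i.toNat with hk
    have hik : i = (k : Int) := by omega
    have hklen : k + 3 ≤ hnet.toList.length := by omega
    refine ⟨k, hklen, ?_⟩
    rw [hik, slice_toList hnet k hklen, take3_drop _ _ hklen]
  · rintro ⟨k, hklen, hy⟩
    refine ⟨(k : Int), ?_, ?_⟩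
    · rw [PySem.List.mem_pyRange_one, PySem.Str.len_eq]; omega
    · rw [← String.toList_inj, slice_toList hnet k hklen, ← take3_drop _ _ hklen, hy]

lemma B_iff (S H : List String) (line : String) :
    check_parts2_alt S H line = true ↔ matchProp S H := by
  rw [check_parts2_alt]
  simp only [Bool.not_eq_true']
  rw [List.isEmpty_eq_false_iff, ne_eq, List.eq_nil_iff_forall_not_mem]
  push_neg
  constructor
  · rintro ⟨y, hy⟩
    rw [PySem.Set.mem_inter] at hy
    obtain ⟨hyb, hyw⟩ := hy
    rw [mem_babs] at hyb
    rw [mem_windows] at hyw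
    rcases hyb with h | hyb
    · exact absurd h (by simp [PySem.Set.empty])
    rcases hyw with h | hyw
    · exact absurd h (by simp [PySem.Set.empty])
    obtain ⟨part, hpart, hbab⟩ := hyb
    rw [babAt_iff] at hbab
    obtain ⟨k, hklen, hc02, hc01, rfl⟩ := hbab
    obtain ⟨hnet, hh, hwin⟩ := hyw
    rw [window_iff] at hwin
    refine ⟨part, hpart, k, hklen, hc02, hc01, hnet, hh, ?_⟩
    rw [infix_iff_window _ _ (by simp)]
    obtain ⟨j, hj, hjw⟩ := hwin
    exact ⟨j, hj, by rw [hjw]; simp⟩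
  · rintro ⟨part, hpart, k, hklen, hc02, hc01, hnet, hh, hinf⟩
    set y := String.ofList [part.toList.getD (k + 1) ' ', part.toList.getD k ' ', part.toList.getD (k + 1) ' '] with hy
    refine ⟨y, ?_⟩
    rw [PySem.Set.mem_inter, mem_babs, mem_windows]
    constructor
    · refine Or.inr ⟨part, hpart, ?_⟩
      rw [babAt_iff]
      exact ⟨k, hklen, hc02, hc01, rfl⟩
    · refine Or.inr ⟨hnet, hh, ?_⟩
      rw [window_iff]
      rw [infix_iff_window _ _ (by simp)] at hinf
      obtain ⟨j, hj, hjw⟩ := hinf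
      exact ⟨j, hj, by rw [hjw, hy]; simp [List.getD]⟩

-- ===== VERDICT (by name: the statement is the Claim_ definition above) =====
theorem check_parts2_spec : Claim_equal_check_parts2 := by
  intro S H line _
  unfold Spec_check_parts2
  rw [Bool.eq_iff_iff, A_iff S H line, B_iff S H line]
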